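-- pv_equiv track=rewrite | github.com/dneff/adventofcode | python/2017/17/solution2.py | find_value_after_zero
-- ===== SOURCE A (Python) =====
-- def find_value_after_zero(step_size, num_insertions):
--     """
--     Find the value at position 1 (after 0) without building the full buffer.
--
--     Args:
--         step_size: Number of steps to move forward each iteration
--         num_insertions: Number of values to insert
--
--     Returns:
--         Value that would be at position 1 after all insertions
--     """
--     current_position = 0
--     buffer_size = 1
--     value_after_zero = 0
--
--     for value in range(1, num_insertions + 1):
--         # Calculate new position after stepping
--         current_position = (current_position + step_size) % buffer_size
--
--         # Increment buffer size (we're about to insert)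
--         buffer_size += 1
--
--         # Move to newly inserted position
--         current_position += 1
--
--         # If we inserted at position 1, track this value
--         if current_position == 1:
--             value_after_zero = value
--
--     return value_after_zero
-- ===== SOURCE B (Python) =====
-- def find_value_after_zero(step_size, num_insertions):
--     """Skip-ahead spinlock: after each real insertion, for a positive step
--     jump over the whole run of future insertions whose landing spot stays
--     inside the buffer (they can neither wrap nor land at position 1)."""
--     pos = 0
--     res = 0
--     v = 1
--     while v <= num_insertions:
--         pos = (pos + step_size) % v + 1
--         if pos == 1:
--             res = v
--         v += 1
--         if step_size > 0:
--             # each skipped insertion does pos += step_size + 1 while the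
--             # buffer grows by 1; the run ends when pos would reach the end
--             k = min(num_insertions - v + 1,
--                     (v - pos - step_size - 1) // step_size + 1)
--             if k > 0:
--                 pos += k * (step_size + 1)
--                 v += k
--     return res
-- ===== Notes on version B (the rewrite author's own statement) =====
-- stated objective: alternative
-- what changed: Instead of simulating every insertion, B jumps over whole runs of insertions whose landing spot provably stays inside the buffer (they can neither wrap nor land at position 1), advancing position and counter by a computed run length; the skip applies for positive step sizes.
import Mathlib
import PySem

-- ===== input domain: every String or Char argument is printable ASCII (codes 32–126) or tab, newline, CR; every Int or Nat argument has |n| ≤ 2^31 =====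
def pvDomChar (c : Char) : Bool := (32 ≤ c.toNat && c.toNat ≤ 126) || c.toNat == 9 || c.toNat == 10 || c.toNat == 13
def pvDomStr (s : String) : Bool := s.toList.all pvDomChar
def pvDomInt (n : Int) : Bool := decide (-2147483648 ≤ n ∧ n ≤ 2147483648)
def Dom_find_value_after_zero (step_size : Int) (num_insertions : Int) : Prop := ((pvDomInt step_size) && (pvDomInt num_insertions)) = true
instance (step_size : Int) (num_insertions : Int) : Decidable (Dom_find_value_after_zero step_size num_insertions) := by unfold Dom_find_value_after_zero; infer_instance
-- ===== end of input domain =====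

-- B skip-aheads: for a positive step it jumps over whole runs of insertions whose
-- landing spot stays inside the buffer, instead of simulating each insertion.

-- ===== PORT A =====
-- state = (current_position, buffer_size, value_after_zero)
def find_value_after_zero (step_size : Int) (num_insertions : Int) : Int :=
  let st := (PySem.List.pyRange 1 (num_insertions + 1) 1).foldl
    (fun (st : Int × Int × Int) value =>
      let cp := PySem.Int.mod (st.1 + step_size) st.2.1
      let bs := st.2.1 + 1
      let cp := cp + 1
      let res := if cp == 1 then value else st.2.2
      (cp, bs, res)) (0, 1, 0)
  st.2.2

-- ===== PORT B =====
-- the while-loop of Source B; v is the value being inserted (= current buffer size);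
-- fuel = remaining iterations in the worst case (standard while-loop encoding)
def fvazAltLoop (s n : Int) (fuel : Nat) (pos res v : Int) : Int :=
  match fuel with
  | 0 => res
  | fuel + 1 =>
    if v ≤ n then
      let pos1 := PySem.Int.mod (pos + s) v + 1
      let res1 := if pos1 == 1 then v else res
      let v1 := v + 1
      if 0 < s then
        let k := min (n - v1 + 1) (PySem.Int.floordiv (v1 - pos1 - s - 1) s + 1)
        if 0 < k then fvazAltLoop s n (fuel - k.toNat) (pos1 + k * (s + 1)) res1 (v1 + k)
        else fvazAltLoop s n fuel pos1 res1 v1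
      else fvazAltLoop s n fuel pos1 res1 v1
    else res
termination_by fuel
decreasing_by
  · exact Nat.lt_succ_of_le (Nat.sub_le _ _)
  · exact Nat.lt_succ_self fuel
  · exact Nat.lt_succ_self fuel

def find_value_after_zero_alt (step_size : Int) (num_insertions : Int) : Int :=
  fvazAltLoop step_size num_insertions num_insertions.toNat 0 0 1

-- ===== PRECONDITION & SPEC =====
def Spec_find_value_after_zero (step_size : Int) (num_insertions : Int) (out : Int) : Prop := out = find_value_after_zero_alt step_size num_insertions
instance (step_size : Int) (num_insertions : Int) (out : Int) : Decidable (Spec_find_value_after_zero step_size num_insertions out) := by unfold Spec_find_value_after_zero; infer_instance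

-- ===== CLAIM (what is proved, stated in full; the proofs are below) =====
def Claim_equal_find_value_after_zero : Prop := ∀ (step_size : Int) (num_insertions : Int), Dom_find_value_after_zero step_size num_insertions → Spec_find_value_after_zero step_size num_insertions (find_value_after_zero step_size num_insertions)

-- ===== LEMMAS AND PROOFS =====

-- A's loop written as a recursion on the value counter (proof-side only)
def fvazALoop (s n : Int) (pos res v : Int) : Int :=
  if v ≤ n then
    fvazALoop s n (PySem.Int.mod (pos + s) v + 1)
      (if PySem.Int.mod (pos + s) v + 1 == 1 then v else res) (v + 1)
  else res
termination_by (n + 1 - v).toNat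
decreasing_by omega

theorem fvazALoop_unfold_le (s n pos res v : Int) (h : v ≤ n) :
    fvazALoop s n pos res v =
      fvazALoop s n (PySem.Int.mod (pos + s) v + 1)
        (if PySem.Int.mod (pos + s) v + 1 == 1 then v else res) (v + 1) := by
  rw [fvazALoop]; simp [h]

theorem fvazALoop_unfold_gt (s n pos res v : Int) (h : ¬ v ≤ n) :
    fvazALoop s n pos res v = res := by
  rw [fvazALoop]; simp [h]

-- A's fold equals the recursion
theorem fvazFold_eq_aLoop (s n : Int) (k : Nat) :
    ∀ (pos res v : Int), (n + 1 - v).toNat = k →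
    ((PySem.List.pyRange v (n + 1) 1).foldl
      (fun (st : Int × Int × Int) value =>
        let cp := PySem.Int.mod (st.1 + s) st.2.1
        let bs := st.2.1 + 1
        let cp := cp + 1
        let res := if cp == 1 then value else st.2.2
        (cp, bs, res)) (pos, v, res)).2.2 = fvazALoop s n pos res v := by
  induction k with
  | zero =>
    intro pos res v hk
    have hv : ¬ v ≤ n := by omega
    rw [PySem.List.pyRange_one_eq_nil (by omega), fvazALoop_unfold_gt s n pos res v hv]
    rfl
  | succ k ih =>
    intro pos res v hk
    have hv : v ≤ n := by omega
    rw [PySem.List.pyRange_one_cons (by omega), fvazALoop_unfold_le s n pos res v hv]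
    simp only [List.foldl_cons]
    exact ih _ _ _ (by omega)

-- skip lemma: k consecutive non-wrapping iterations change the state linearly
theorem fvazSkip (s n : Int) (k : Nat) :
    ∀ (pos res v : Int), v + k ≤ n + 1 →
    (∀ j : Nat, j < k → 0 < pos + j * (s + 1) + s ∧ pos + j * (s + 1) + s < v + j) →
    fvazALoop s n pos res v = fvazALoop s n (pos + k * (s + 1)) res (v + k) := by
  induction k with
  | zero => intro pos res v _ _; norm_num
  | succ k ih =>
    intro pos res v hle hcond
    have h0 := hcond 0 (by omega)
    simp only [Nat.cast_zero, zero_mul, add_zero] at h0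
    have hv : v ≤ n := by push_cast at hle; omega
    have hvpos : 0 < v := by omega
    rw [fvazALoop_unfold_le s n pos res v hv]
    have hmod : PySem.Int.mod (pos + s) v = pos + s := by
      rw [PySem.Int.mod_eq_emod_of_pos hvpos]
      exact Int.emod_eq_of_lt (by omega) h0.2
    rw [hmod]
    have hne : ((pos + s + 1 == 1) : Bool) = false := by
      simp only [beq_eq_false_iff_ne, ne_eq]; omega
    simp only [hne, Bool.false_eq_true, if_false]
    have := ih (pos + s + 1) res (v + 1)
      (by push_cast at hle ⊢; omega)
      (by
        intro j hj
        have := hcond (j + 1) (by omega)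
        constructor <;> [skip; skip] <;> push_cast at this ⊢ <;> nlinarith [this.1, this.2])
    rw [this]
    congr 1 <;> push_cast <;> ring

-- main lemma: A's recursion equals B's skip-ahead recursion
theorem fvazLoop_eq (s n : Int) (fuel : Nat) :
    ∀ (pos res v : Int), (n + 1 - v).toNat = fuel → 1 ≤ v →
    fvazALoop s n pos res v = fvazAltLoop s n fuel pos res v := by
  induction fuel using Nat.strong_induction_on with
  | _ fuel ih =>
  intro pos res v hk hv1
  match fuel, hk with
  | 0, hk =>
    have hv : ¬ v ≤ n := by omega
    rw [fvazALoop_unfold_gt s n pos res v hv, fvazAltLoop]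
  | fuel + 1, hk =>
    have hv : v ≤ n := by omega
    rw [fvazALoop_unfold_le s n pos res v hv, fvazAltLoop]
    simp only [hv, if_true]
    set pos1 := PySem.Int.mod (pos + s) v + 1 with hpos1
    have hp1lo : 1 ≤ pos1 := by
      have := PySem.Int.mod_nonneg (pos + s) (show (0:Int) < v by omega)
      omega
    have hp1hi : pos1 ≤ v := by
      have := PySem.Int.mod_lt (pos + s) (show (0:Int) < v by omega)
      omega
    by_cases hs : 0 < s
    · simp only [hs, if_true]
      set kk := min (n - (v + 1) + 1) (PySem.Int.floordiv (v + 1 - pos1 - s - 1) s + 1) with hkk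
      by_cases h3 : 0 < kk
      · simp only [h3, if_true]
        have hkrem : kk ≤ n - (v + 1) + 1 := min_le_left _ _
        have hkup : kk ≤ PySem.Int.floordiv (v + 1 - pos1 - s - 1) s + 1 := min_le_right _ _
        have hcond : ∀ j : Nat, (j : Int) < kk →
            0 < pos1 + j * (s + 1) + s ∧ pos1 + j * (s + 1) + s < (v + 1) + j := by
          intro j hj
          constructor
          · nlinarith
          · have hjle : (j : Int) ≤ PySem.Int.floordiv (v + 1 - pos1 - s - 1) s := by omega
            rw [PySem.Int.floordiv_eq_ediv_of_pos hs] at hjle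
            have := (Int.le_ediv_iff_mul_le hs).mp hjle
            nlinarith
        have hkknn : 0 ≤ kk := le_of_lt h3
        have hkknat : ((kk.toNat : Int)) = kk := Int.toNat_of_nonneg hkknn
        have hskip := fvazSkip s n kk.toNat pos1
          (if pos1 == 1 then v else res) (v + 1)
          (by rw [hkknat]; omega)
          (by intro j hj; exact hcond j (by omega))
        rw [hskip, hkknat]
        exact ih (fuel - kk.toNat) (by omega) _ _ _ (by omega) (by omega)
      · simp only [h3, if_false]
        exact ih fuel (by omega) _ _ _ (by omega) (by omega)
    · simp only [hs, if_false]
      exact ih fuel (by omega) _ _ _ (by omega) (by omega)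

-- ===== VERDICT (by name: the statement is the Claim_ definition above) =====
theorem find_value_after_zero_spec : Claim_equal_find_value_after_zero := by
  intro s n _
  unfold Spec_find_value_after_zero find_value_after_zero find_value_after_zero_alt
  rw [fvazFold_eq_aLoop s n (n + 1 - 1).toNat 0 0 1 rfl]
  exact fvazLoop_eq s n n.toNat 0 0 1 (by omega) (by omega)
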